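-- pv_equiv track=rewrite | github.com/Scaleup-Excellenteam/git-pull-request-training-VladimirBondar23 | PythonProjects/pythonProject1/Hw4-2.py | count_minimal_bits
-- ===== SOURCE A (Python) =====
-- def count_minimal_bits(result):
--     minimal_bits = 1000
--     best_binary = []
--
--     for i in range(1,16):
--         valid = True
--         for number, _ in result:
--             if i & number == 0:
--                 valid = False
--                 break
--         if not valid:
--             continue
--         else:
--             if i.bit_count() < minimal_bits:
--                 minimal_bits = i.bit_count()
--             best_binary.append(i)
--
--     best_binary = list(filter(lambda num: num.bit_count() == minimal_bits, best_binary))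
--     return minimal_bits, best_binary
-- ===== SOURCE B (Python) =====
-- _GROUPS = ((1, (1, 2, 4, 8)), (2, (3, 5, 6, 9, 10, 12)), (3, (7, 11, 13, 14)), (4, (15,)))
--
--
-- def count_minimal_bits(result):
--     # Search masks by increasing popcount; the first group with any valid mask wins.
--     for bits, masks in _GROUPS:
--         valid = [m for m in masks if all(m & n for n, _ in result)]
--         if valid:
--             return bits, valid
--     return 1000, []
-- ===== Notes on version B (the rewrite author's own statement) =====
-- stated objective: alternative
-- what changed: B replaces A's full scan of masks 1..15 with end-of-loop min-popcount filtering by an early-returning search over masks grouped by increasing popcount, returning at the first group containing a valid mask.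
import Mathlib
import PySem

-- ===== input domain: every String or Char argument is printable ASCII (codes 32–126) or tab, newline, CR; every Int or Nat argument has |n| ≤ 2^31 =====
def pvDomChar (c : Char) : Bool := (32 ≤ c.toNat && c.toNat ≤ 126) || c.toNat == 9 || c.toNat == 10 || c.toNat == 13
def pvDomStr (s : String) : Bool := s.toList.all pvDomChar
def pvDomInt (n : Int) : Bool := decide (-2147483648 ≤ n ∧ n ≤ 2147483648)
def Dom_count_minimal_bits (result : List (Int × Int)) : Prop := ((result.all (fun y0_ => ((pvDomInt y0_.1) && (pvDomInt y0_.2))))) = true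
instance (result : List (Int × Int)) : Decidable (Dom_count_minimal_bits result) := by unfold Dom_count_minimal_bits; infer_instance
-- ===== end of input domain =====

-- B restructures A's scan of masks 1..15 into an early-returning search by increasing popcount (alternative decomposition, same cost class).

-- ===== PORT A =====
-- inner 'for number, _ in result' loop with its break
def cmbInnerA (i : Int) : List (Int × Int) → Bool
  | [] => true
  | (number, _) :: rest => if PySem.Int.band i number = 0 then false else cmbInnerA i rest

def count_minimal_bits (result : List (Int × Int)) : Int × List Int :=
  let st := (PySem.List.pyRange 1 16 1).foldl
    (fun (st : Int × List Int) i =>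
      if cmbInnerA i result then
        ((if (PySem.Int.bitCount i : Int) < st.1 then (PySem.Int.bitCount i : Int) else st.1),
         st.2 ++ [i])
      else st)
    ((1000 : Int), ([] : List Int))
  (st.1, st.2.filter (fun num => (PySem.Int.bitCount num : Int) == st.1))

-- ===== PORT B =====
-- masks grouped by popcount, ascending inside each group
def cmbGroups : List (Int × List Int) :=
  [(1, [1, 2, 4, 8]), (2, [3, 5, 6, 9, 10, 12]), (3, [7, 11, 13, 14]), (4, [15])]

-- 'all(m & n for n, _ in result)'
def cmbValidB (result : List (Int × Int)) (m : Int) : Bool :=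
  result.all (fun p => PySem.Int.band m p.1 != 0)

def cmbSearch (result : List (Int × Int)) : List (Int × List Int) → Int × List Int
  | [] => (1000, [])
  | (bits, masks) :: rest =>
    let valid := masks.filter (cmbValidB result)
    if valid.isEmpty then cmbSearch result rest else (bits, valid)

def count_minimal_bits_alt (result : List (Int × Int)) : Int × List Int :=
  cmbSearch result cmbGroups

-- ===== PRECONDITION & SPEC =====
def Spec_count_minimal_bits (result : List (Int × Int)) (out : Int × List Int) : Prop := out = count_minimal_bits_alt result
instance (result : List (Int × Int)) (out : Int × List Int) : Decidable (Spec_count_minimal_bits result out) := by unfold Spec_count_minimal_bits; infer_instance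

-- ===== CLAIM (what is proved, stated in full; the proofs are below) =====
def Claim_equal_count_minimal_bits : Prop := ∀ (result : List (Int × Int)), Dom_count_minimal_bits result → Spec_count_minimal_bits result (count_minimal_bits result)

-- ===== LEMMAS AND PROOFS =====

-- A's computation abstracted over the per-mask validity predicate (same shape as port A)
def cmbGenAv (v : Int → Bool) : Int × List Int :=
  let st := (PySem.List.pyRange 1 16 1).foldl
    (fun (st : Int × List Int) i =>
      if v i then
        ((if (PySem.Int.bitCount i : Int) < st.1 then (PySem.Int.bitCount i : Int) else st.1),
         st.2 ++ [i])
      else st)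
    ((1000 : Int), ([] : List Int))
  (st.1, st.2.filter (fun num => (PySem.Int.bitCount num : Int) == st.1))

-- B's search abstracted over the same predicate (same shape as port B)
def cmbSearchV (v : Int → Bool) : List (Int × List Int) → Int × List Int
  | [] => (1000, [])
  | (bits, masks) :: rest =>
    let valid := masks.filter v
    if valid.isEmpty then cmbSearchV v rest else (bits, valid)

def cmbGenBv (v : Int → Bool) : Int × List Int := cmbSearchV v cmbGroups

def cmbBC (i : Int) : Int := (PySem.Int.bitCount i : Int)
def cmbMasksL : List Int := [1,2,3,4,5,6,7,8,9,10,11,12,13,14,15]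
def cmbMinF (m i : Int) : Int := if cmbBC i < m then cmbBC i else m
def cmbStepA (v : Int → Bool) (st : Int × List Int) (i : Int) : Int × List Int :=
  if v i then (cmbMinF st.1 i, st.2 ++ [i]) else st

lemma cmbInnerA_eq (i : Int) (result : List (Int × Int)) :
    cmbInnerA i result = cmbValidB result i := by
  induction result with
  | nil => rfl
  | cons p rest ih =>
    obtain ⟨n, m⟩ := p
    by_cases h : PySem.Int.band i n = 0
    · simp [cmbInnerA, cmbValidB, h]
    · simp only [cmbInnerA, if_neg h, ih, cmbValidB, List.all_cons]
      simp [h]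

lemma cmbA_gen (result : List (Int × Int)) :
    count_minimal_bits result = cmbGenAv (fun i => cmbInnerA i result) := rfl

lemma cmbB_gen (result : List (Int × Int)) :
    count_minimal_bits_alt result = cmbGenBv (cmbValidB result) := rfl

lemma cmbFoldA_snd (v : Int → Bool) (l : List Int) (st : Int × List Int) :
    (l.foldl (cmbStepA v) st).2 = st.2 ++ l.filter v := by
  induction l generalizing st with
  | nil => simp
  | cons a t ih =>
    by_cases h : v a <;>
      simp [List.foldl_cons, cmbStepA, h, ih]

lemma cmbFoldA_fst (v : Int → Bool) (l : List Int) (st : Int × List Int) :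
    (l.foldl (cmbStepA v) st).1 = (l.filter v).foldl cmbMinF st.1 := by
  induction l generalizing st with
  | nil => rfl
  | cons a t ih =>
    by_cases h : v a <;>
      simp [List.foldl_cons, cmbStepA, h, ih]

lemma cmbGenAv_char (v : Int → Bool) :
    cmbGenAv v =
      ((cmbMasksL.filter v).foldl cmbMinF 1000,
       (cmbMasksL.filter v).filter
         (fun i => cmbBC i == (cmbMasksL.filter v).foldl cmbMinF 1000)) := by
  have hr : PySem.List.pyRange 1 16 1 = cmbMasksL := rfl
  show ((cmbMasksL.foldl (cmbStepA v) (1000, [])).1,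
        (cmbMasksL.foldl (cmbStepA v) (1000, [])).2.filter
          (fun num => cmbBC num == (cmbMasksL.foldl (cmbStepA v) (1000, [])).1)) = _
  rw [cmbFoldA_fst, cmbFoldA_snd]
  simp

lemma cmbFoldMin_le_init (l : List Int) (m : Int) : l.foldl cmbMinF m ≤ m := by
  induction l generalizing m with
  | nil => simp
  | cons a t ih =>
    refine le_trans (ih (cmbMinF m a)) ?_
    unfold cmbMinF; split <;> omega

lemma cmbFoldMin_le_mem (l : List Int) (m a : Int) (h : a ∈ l) :
    l.foldl cmbMinF m ≤ cmbBC a := by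
  induction l generalizing m with
  | nil => simp at h
  | cons b t ih =>
    rcases List.mem_cons.mp h with rfl | h'
    · refine le_trans (cmbFoldMin_le_init t (cmbMinF m a)) ?_
      unfold cmbMinF; split <;> omega
    · exact ih _ h'

lemma cmbLe_foldMin (l : List Int) (m b : Int) (hm : b ≤ m)
    (h : ∀ i ∈ l, b ≤ cmbBC i) : b ≤ l.foldl cmbMinF m := by
  induction l generalizing m with
  | nil => simpa
  | cons a t ih =>
    refine ih (cmbMinF m a) ?_ (fun i hi => h i (List.mem_cons_of_mem a hi))
    have := h a (List.mem_cons_self)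
    unfold cmbMinF; split <;> omega

-- in the branch where group b is the first with a valid mask, A's pair is (b, Gb.filter v)
lemma cmbMaster (v : Int → Bool) (b : Int) (Gb : List Int)
    (hGb : Gb = cmbMasksL.filter (fun i => cmbBC i == b)) (hb : b ≤ 1000)
    (hlow : ∀ i ∈ cmbMasksL, v i = true → b ≤ cmbBC i)
    (hex : ∃ x ∈ Gb, v x = true) :
    (cmbMasksL.filter v).foldl cmbMinF 1000 = b ∧
      (cmbMasksL.filter v).filter (fun i => cmbBC i == b) = Gb.filter v := by
  obtain ⟨x, hxG, hxv⟩ := hex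
  have hx : x ∈ cmbMasksL ∧ cmbBC x = b := by
    have := (List.mem_filter.mp (hGb ▸ hxG))
    exact ⟨this.1, by simpa using this.2⟩
  constructor
  · refine le_antisymm ?_ ?_
    · have hmem : x ∈ cmbMasksL.filter v := List.mem_filter.mpr ⟨hx.1, hxv⟩
      have := cmbFoldMin_le_mem (cmbMasksL.filter v) 1000 x hmem
      omega
    · exact cmbLe_foldMin _ _ _ hb
        (fun i hi => hlow i (List.mem_filter.mp hi).1 (List.mem_filter.mp hi).2)
  · rw [List.filter_filter, hGb, List.filter_filter]
    exact List.filter_congr (fun i _ => by rw [Bool.and_comm])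

-- turn "group b is empty" into pointwise falsity of v
lemma cmbEmptyK (v : Int → Bool) (G : List Int) (h : (G.filter v).isEmpty = true) :
    ∀ x ∈ G, v x = false := by
  rw [List.isEmpty_iff] at h
  intro x hx
  have := List.filter_eq_nil_iff.mp h x hx
  simpa using this

lemma cmbExOfNE (v : Int → Bool) (G : List Int) (h : ¬ (G.filter v).isEmpty = true) :
    ∃ x ∈ G, v x = true := by
  rw [List.isEmpty_iff] at h
  obtain ⟨x, hx⟩ := List.exists_mem_of_ne_nil _ h
  have := List.mem_filter.mp hx
  exact ⟨x, this.1, this.2⟩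

lemma cmbGen_final (v : Int → Bool) : cmbGenAv v = cmbGenBv v := by
  have f1 : ([1,2,4,8] : List Int) = cmbMasksL.filter (fun i => cmbBC i == 1) := by decide
  have f2 : ([3,5,6,9,10,12] : List Int) = cmbMasksL.filter (fun i => cmbBC i == 2) := by decide
  have f3 : ([7,11,13,14] : List Int) = cmbMasksL.filter (fun i => cmbBC i == 3) := by decide
  have f4 : ([15] : List Int) = cmbMasksL.filter (fun i => cmbBC i == 4) := by decide
  have fbc : ∀ i ∈ cmbMasksL, cmbBC i = 1 ∨ cmbBC i = 2 ∨ cmbBC i = 3 ∨ cmbBC i = 4 := by decide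
  have memG : ∀ (b : Int) (G : List Int), G = cmbMasksL.filter (fun i => cmbBC i == b) →
      ∀ i ∈ cmbMasksL, cmbBC i = b → i ∈ G := by
    intro b G hG i hi hbc
    rw [hG]
    exact List.mem_filter.mpr ⟨hi, by simp [hbc]⟩
  rw [cmbGenAv_char]
  simp only [cmbGenBv, cmbGroups, cmbSearchV]
  by_cases h1 : ((([1,2,4,8] : List Int)).filter v).isEmpty = true
  · have hk1 := cmbEmptyK v _ h1
    rw [if_pos h1]
    by_cases h2 : ((([3,5,6,9,10,12] : List Int)).filter v).isEmpty = true
    · have hk2 := cmbEmptyK v _ h2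
      rw [if_pos h2]
      by_cases h3 : ((([7,11,13,14] : List Int)).filter v).isEmpty = true
      · have hk3 := cmbEmptyK v _ h3
        rw [if_pos h3]
        by_cases h4 : ((([15] : List Int)).filter v).isEmpty = true
        · have hk4 := cmbEmptyK v _ h4
          rw [if_pos h4]
          have hV : cmbMasksL.filter v = [] := by
            refine List.filter_eq_nil_iff.mpr (fun i hi => ?_)
            rcases fbc i hi with hc | hc | hc | hc
            · simp [hk1 i (memG 1 _ f1 i hi hc)]
            · simp [hk2 i (memG 2 _ f2 i hi hc)]
            · simp [hk3 i (memG 3 _ f3 i hi hc)]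
            · simp [hk4 i (memG 4 _ f4 i hi hc)]
          rw [hV]
          rfl
        · obtain ⟨hm, hf⟩ := cmbMaster v 4 _ f4 (by norm_num)
            (fun i hi hvi => by
              rcases fbc i hi with hc | hc | hc | hc
              · exact absurd hvi (by simp [hk1 i (memG 1 _ f1 i hi hc)])
              · exact absurd hvi (by simp [hk2 i (memG 2 _ f2 i hi hc)])
              · exact absurd hvi (by simp [hk3 i (memG 3 _ f3 i hi hc)])
              · omega)
            (cmbExOfNE v _ h4)
          rw [if_neg h4, hm, hf]
      · obtain ⟨hm, hf⟩ := cmbMaster v 3 _ f3 (by norm_num)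
          (fun i hi hvi => by
            rcases fbc i hi with hc | hc | hc | hc
            · exact absurd hvi (by simp [hk1 i (memG 1 _ f1 i hi hc)])
            · exact absurd hvi (by simp [hk2 i (memG 2 _ f2 i hi hc)])
            · omega
            · omega)
          (cmbExOfNE v _ h3)
        rw [if_neg h3, hm, hf]
    · obtain ⟨hm, hf⟩ := cmbMaster v 2 _ f2 (by norm_num)
        (fun i hi hvi => by
          rcases fbc i hi with hc | hc | hc | hc
          · exact absurd hvi (by simp [hk1 i (memG 1 _ f1 i hi hc)])
          · omega
          · omega
          · omega)
        (cmbExOfNE v _ h2)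
      rw [if_neg h2, hm, hf]
  · obtain ⟨hm, hf⟩ := cmbMaster v 1 _ f1 (by norm_num)
      (fun i hi _ => by rcases fbc i hi with hc | hc | hc | hc <;> omega)
      (cmbExOfNE v _ h1)
    rw [if_neg h1, hm, hf]

-- ===== VERDICT (by name: the statement is the Claim_ definition above) =====
theorem count_minimal_bits_spec : Claim_equal_count_minimal_bits := by
  intro result _
  unfold Spec_count_minimal_bits
  rw [cmbA_gen, cmbB_gen]
  have hv : (fun i => cmbInnerA i result) = cmbValidB result :=
    funext (fun i => cmbInnerA_eq i result)
  rw [hv]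
  exact cmbGen_final (cmbValidB result)
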